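/- GENERATED by c/gen_decode.py: decode facts of the image, one per distinct instruction byte string. -/
import UserX.DecodeImage

#decode_all Vorbis.Dec
  "01c1"  -- add ecx,eax
  "0f825ffdffff"  -- jb 1069af
  "0f84bb000000"  -- je 114494
  "0f85d5000000"  -- jne 110e31
  "0f8e49010000"  -- jle 10f104
  "0fb6442410"  -- movzx eax,BYTE PTR [rsp+0x10]
  "29d3"  -- sub ebx,edx
  "4080fd0a"  -- cmp bpl,0xa
  "410fbf2f"  -- movsx ebp,WORD PTR [r15]
  "4183e4f8"  -- and r12d,0xfffffff8
  "4189d6"  -- mov r14d,edx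
  "41bc00000000"  -- mov r12d,0x0
  "420fb68423d4050000"  -- movzx eax,BYTE PTR [rbx+r12*1+0x5d4]
  "4429e9"  -- sub ecx,r13d
  "448933"  -- mov DWORD PTR [rbx],r14d
  "4489b3e4060000"  -- mov DWORD PTR [rbx+0x6e4],r14d
  "448b6dbc"  -- mov r13d,DWORD PTR [rbp-0x44]
  "450fb62424"  -- movzx r12d,BYTE PTR [r12]
  "45897c240c"  -- mov DWORD PTR [r12+0xc],r15d
  "460fb77c7302"  -- movzx r15d,WORD PTR [rbx+r14*2+0x2]
  "4839c8"  -- cmp rax,rcx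
  "486bc006"  -- imul rax,rax,0x6
  "4883ec38"  -- sub rsp,0x38
  "48898528ffffff"  -- mov QWORD PTR [rbp-0xd8],rax
  "488b45c8"  -- mov rax,QWORD PTR [rbp-0x38]
  "488bb338010000"  -- mov rsi,QWORD PTR [rbx+0x138]
  "488d5c8500"  -- lea rbx,[rbp+rax*4+0x0]
  "488d7d24"  -- lea rdi,[rbp+0x24]
  "488dbb88000000"  -- lea rdi,[rbx+0x88]
  "488dbdc8010000"  -- lea rdi,[rbp+0x1c8]
  "48c7442430c0961100"  -- mov QWORD PTR [rsp+0x30],0x1196c0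
  "490fafc5"  -- imul rax,r13
  "4989ae38080000"  -- mov QWORD PTR [r14+0x838],rbp
  "498d7c2406"  -- lea rdi,[r12+0x6]
  "498dbcc688050000"  -- lea rdi,[r14+rax*8+0x588]
  "4a8d3ca5001c1200"  -- lea rdi,[r12*4+0x121c00]
  "4c037318"  -- add r14,QWORD PTR [rbx+0x18]
  "4c897c2418"  -- mov QWORD PTR [rsp+0x18],r15
  "4c8b742410"  -- mov r14,QWORD PTR [rsp+0x10]
  "4c8d7528"  -- lea r14,[rbp+0x28]
  "4d89e7"  -- mov r15,r12
  "4f8d7cb500"  -- lea r15,[r13+r14*4+0x0]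
  "66410f6ec4"  -- movd xmm0,r12d
  "66463bbcac20010000"  -- cmp r15w,WORD PTR [rsp+r13*4+0x120]
  "740a"  -- je 10cbd7
  "74ac"  -- je 114792
  "7612"  -- jbe 111781
  "7d4c"  -- jge 103284
  "7f5f"  -- jg 115cc2
  "8344240801"  -- add DWORD PTR [rsp+0x8],0x1
  "83f918"  -- cmp ecx,0x18
  "895c2438"  -- mov DWORD PTR [rsp+0x38],ebx
  "89cd"  -- mov ebp,ecx
  "8b4c243c"  -- mov ecx,DWORD PTR [rsp+0x3c]
  "8b8540ffffff"  -- mov eax,DWORD PTR [rbp-0xc0]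
  "8d83fe030000"  -- lea eax,[rbx+0x3fe]
  "c1e004"  -- shl eax,0x4
  "c7800000c000f1f1f1f1"  -- mov DWORD PTR [rax+0xc00000],0xf1f1f1f1
  "c785e804000000000000"  -- mov DWORD PTR [rbp+0x4e8],0x0
  "e807f8ffff"  -- call 104100
  "e81194ffff"  -- call 104800
  "e81bb8feff"  -- call 100640
  "e8252effff"  -- call 100640
  "e82deaffff"  -- call 10dbc0
  "e83855ffff"  -- call 100800
  "e84378ffff"  -- call 100640
  "e84d9effff"  -- call 10d040
  "e8588cffff"  -- call 100300
  "e8664fffff"  -- call 100300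
  "e8716cffff"  -- call 100720
  "e87ba7feff"  -- call 1008e0
  "e887e4ffff"  -- call 10d5c0
  "e891eeffff"  -- call 100300
  "e89bb6feff"  -- call 100640
  "e8a63dffff"  -- call 100720
  "e8b033ffff"  -- call 100300
  "e8b9bbfeff"  -- call 1003c0
  "e8c466ffff"  -- call 100640
  "e8cda4ffff"  -- call 100640
  "e8d8a8feff"  -- call 1003c0
  "e8e1affeff"  -- call 1003c0
  "e8eb9ffeff"  -- call 100300
  "e8f3a4feff"  -- call 1003c0
  "e8ff9dffff"  -- call 10cbc0
  "e93fffffff"  -- jmp 107767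
  "e98cefffff"  -- jmp 113b22
  "e9e1d5ffff"  -- jmp 113b22
  "eb51"  -- jmp 108837
  "ebd1"  -- jmp 108373
  "f20f2aed"  -- cvtsi2sd xmm5,ebp
  "f20f5cc8"  -- subsd xmm1,xmm0
  "f30f104b08"  -- movss xmm1,DWORD PTR [rbx+0x8]
  "f30f106d00"  -- movss xmm5,DWORD PTR [rbp+0x0]
  "f30f114c2404"  -- movss DWORD PTR [rsp+0x4],xmm1
  "f30f116db0"  -- movss DWORD PTR [rbp-0x50],xmm5
  "f30f586da4"  -- addss xmm5,DWORD PTR [rbp-0x5c]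
  "f30f59c7"  -- mulss xmm0,xmm7
  "f30f5cf3"  -- subss xmm6,xmm3
  "f3410f116608"  -- movss DWORD PTR [r14+0x8],xmm4
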